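-- pv_equiv track=rewrite | github.com/ekeilty17/Project_Euler | P100.py | pell_equation_method
-- ===== SOURCE A (Python) =====
-- def multiply_pell_solutions(S1, S2, d):
--     x1, y1 = S1
--     x2, y2 = S2
--     return (x1*x2 + d * y1*y2), (x1*y2 + x2*y1)
--
-- def pell_equation_method(N):
--     # initialize our solutions to the pell equation
--     x0, y0 = 1, 1
--     xn, yn = x0, y0         # nth solutions to      x^2 - d * y^2 = -1
--
--     n, b = (xn+1)//2, (yn+1)//2
--     while n < N:
--         # since this pell equation equals -1, we have to multiply the fundamental solution twice
--         # because the intermediate will be the solution when the pell equation equals +1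
--         xn, yn = multiply_pell_solutions((xn, yn), (x0, y0), d=2)
--         xn, yn = multiply_pell_solutions((xn, yn), (x0, y0), d=2)
--
--         n, b = (xn+1)//2, (yn+1)//2
--
--     return b, n
-- ===== SOURCE B (Python) =====
-- def pell_equation_method(N):
--     # Track only the n-sequence (n_k = 6*n_{k-1} - n_{k-2} - 2, the NSW/convergent
--     # second-order recurrence); b is recovered at the end from the last two terms
--     # by the closed formula b = (3*n - prev + 1) // 4.
--     prev, n = 0, 1
--     while n < N:
--         prev, n = n, 6*n - prev - 2
--     return (3*n - prev + 1) // 4, n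
-- ===== Notes on version B (the rewrite author's own statement) =====
-- stated objective: alternative
-- what changed: Replaces A's coupled 2D Pell state (xn,yn) with its multiply_pell_solutions helper by a scalar second-order recurrence n_{k+1}=6n_k-n_{k-1}-2 on the n-sequence alone; b is not maintained in the loop at all and is recovered at the end from the last two terms by the closed formula b=(3n-prev+1)//4.
import Mathlib
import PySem

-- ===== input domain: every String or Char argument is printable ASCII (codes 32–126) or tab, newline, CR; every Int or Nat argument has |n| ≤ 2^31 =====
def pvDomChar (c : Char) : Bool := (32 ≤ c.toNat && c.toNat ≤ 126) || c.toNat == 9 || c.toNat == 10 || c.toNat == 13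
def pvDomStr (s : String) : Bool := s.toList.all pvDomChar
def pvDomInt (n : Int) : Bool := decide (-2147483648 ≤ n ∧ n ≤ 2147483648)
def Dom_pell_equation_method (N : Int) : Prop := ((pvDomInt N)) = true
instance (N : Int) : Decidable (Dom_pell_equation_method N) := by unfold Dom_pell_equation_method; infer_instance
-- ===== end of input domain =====

-- B drops the 2D Pell state and its multiplication helper: it iterates the scalar
-- second-order recurrence n_{k+1} = 6*n_k - n_{k-1} - 2 and recovers b at the end
-- by the closed formula b = (3n - prev + 1) // 4; objective: alternative.

-- ===== PORT A =====
def multiply_pell_solutions (S1 S2 : Int × Int) (d : Int) : Int × Int :=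
  (S1.1 * S2.1 + d * S1.2 * S2.2, S1.1 * S2.2 + S2.1 * S1.2)

-- the while loop of A; invariant 1 ≤ xn, 1 ≤ yn ensures termination
def pellLoopA (N xn yn : Int) (hx : 1 ≤ xn) (hy : 1 ≤ yn) : Int × Int :=
  if h : PySem.Int.floordiv (xn + 1) 2 < N then
    let p1 := multiply_pell_solutions (xn, yn) (1, 1) 2
    let p2 := multiply_pell_solutions p1 (1, 1) 2
    pellLoopA N p2.1 p2.2 (by simp [multiply_pell_solutions, p2, p1]; omega)
      (by simp [multiply_pell_solutions, p2, p1]; omega)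
  else (PySem.Int.floordiv (yn + 1) 2, PySem.Int.floordiv (xn + 1) 2)
termination_by (2 * N - xn).toNat
decreasing_by
  simp only [multiply_pell_solutions]
  have h2 : xn + 1 < N * 2 := (PySem.Int.floordiv_lt_iff_lt_mul (by omega)).mp h
  omega

def pell_equation_method (N : Int) : Int × Int :=
  pellLoopA N 1 1 (by omega) (by omega)

-- ===== PORT B =====
-- the while loop of B; invariant 0 ≤ prev < n ensures termination
def pellLoopB (N prev n : Int) (h0 : 0 ≤ prev) (h1 : prev < n) : Int × Int :=
  if h : n < N then
    pellLoopB N n (6 * n - prev - 2) (by omega) (by omega)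
  else (PySem.Int.floordiv (3 * n - prev + 1) 4, n)
termination_by (N - n).toNat
decreasing_by omega

def pell_equation_method_alt (N : Int) : Int × Int :=
  pellLoopB N 0 1 (by omega) (by omega)

-- ===== PRECONDITION & SPEC =====
def Spec_pell_equation_method (N : Int) (out : Int × Int) : Prop := out = pell_equation_method_alt N
instance (N : Int) (out : Int × Int) : Decidable (Spec_pell_equation_method N out) := by unfold Spec_pell_equation_method; infer_instance

-- ===== CLAIM (what is proved, stated in full; the proofs are below) =====
def Claim_equal_pell_equation_method : Prop := ∀ (N : Int), Dom_pell_equation_method N → Spec_pell_equation_method N (pell_equation_method N)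

-- ===== LEMMAS AND PROOFS =====

theorem fd2 (n : Int) : PySem.Int.floordiv (2 * n) 2 = n := by
  rw [PySem.Int.floordiv_eq_ediv_of_pos (by omega)]; omega

theorem fd_half (a b : Int) (h : 2 * a = b) :
    PySem.Int.floordiv a 2 = PySem.Int.floordiv b 4 := by
  rw [PySem.Int.floordiv_eq_ediv_of_pos (by omega),
      PySem.Int.floordiv_eq_ediv_of_pos (by omega)]
  omega

-- correspondence: A's state (xn, yn) = (2n-1, (3n-prev-1)/2) tracks B's state (prev, n)
theorem loop_eq (N prev n y : Int) (h0 : 0 ≤ prev) (h1 : prev < n)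
    (h2y : 2 * y = 3 * n - prev - 1)
    (hx : (1:Int) ≤ 2 * n - 1) (hy : (1:Int) ≤ y) :
    pellLoopA N (2 * n - 1) y hx hy = pellLoopB N prev n h0 h1 := by
  rw [pellLoopA.eq_def, pellLoopB.eq_def]
  have e1 : 2 * n - 1 + 1 = 2 * n := by ring
  have hcond : PySem.Int.floordiv (2 * n - 1 + 1) 2 = n := by rw [e1, fd2]
  by_cases h : n < N
  · simp only [hcond, h, dif_pos, multiply_pell_solutions]
    -- after two Pell multiplications: x'' = 3x + 4y, y'' = 2x + 3y
    have ex : ((2 * n - 1) * 1 + 2 * y * 1) * 1 + 2 * ((2 * n - 1) * 1 + 1 * y) * 1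
        = 2 * (6 * n - prev - 2) - 1 := by omega
    have ey : ((2 * n - 1) * 1 + 2 * y * 1) * 1 + 1 * ((2 * n - 1) * 1 + 1 * y)
        = 2 * (2 * n - 1) + 3 * y := by ring
    have := loop_eq N n (6 * n - prev - 2) (2 * (2 * n - 1) + 3 * y)
      (by omega) (by omega) (by omega) (by omega) (by omega)
    simp only [ex, ey] at *
    exact this
  · have hb : PySem.Int.floordiv (y + 1) 2 = PySem.Int.floordiv (3 * n - prev + 1) 4 :=
      fd_half _ _ (by omega)
    rw [dif_neg (by rw [hcond]; exact h), dif_neg h, hb, hcond]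
termination_by (N - n).toNat
decreasing_by omega

-- ===== VERDICT (by name: the statement is the Claim_ definition above) =====
theorem pell_equation_method_spec : Claim_equal_pell_equation_method := by
  intro N _
  unfold Spec_pell_equation_method pell_equation_method pell_equation_method_alt
  have := loop_eq N 0 1 1 (by omega) (by omega) (by omega) (by omega) (by omega)
  simpa using this
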